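-- pv_equiv track=rewrite | github.com/sb-ai-lab/synthesize_or_not | zero-shot/ForecastPFN/run_benchmarks.py | get_closest_split
-- ===== SOURCE A (Python) =====
-- def getDivisors(n, res=None) :
--     res = res or []
--     i = 1
--     while i <= n :
--         if (n % i==0) :
--             res.append(i),
--         i = i + 1
--     return res
--
-- def get_closest_split(n, close_to=1440):
--     all_divisors = getDivisors(n)
--     for ix, val in enumerate(all_divisors):
--         if close_to < val:
--             if ix == 0: return val
--             if (val-close_to)>(close_to - all_divisors[ix-1]):
--                 return all_divisors[ix-1]
--             return val
-- ===== SOURCE B (Python) =====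
-- def get_closest_split(n, close_to=1440):
--     # Collect divisors in pairs up to sqrt(n): small ascending, large descending.
--     small, large = [], []
--     i = 1
--     while i * i <= n:
--         if n % i == 0:
--             small.append(i)
--             if i != n // i:
--                 large.append(n // i)
--         i += 1
--     divisors = small + large[::-1]   # already sorted ascending
--     prev = None
--     for val in divisors:
--         if close_to < val:
--             if prev is None:
--                 return val
--             if (val - close_to) > (close_to - prev):
--                 return prev
--             return val
--         prev = val
--     return None
-- ===== Notes on version B (the rewrite author's own statement) =====
-- stated objective: faster
-- what changed: Divisors are enumerated in pairs (i, n//i) only up to sqrt(n) and concatenated in sorted order, and the closest one is selected in a single scan carrying the previous divisor instead of indexing back into the list.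
import Mathlib
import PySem

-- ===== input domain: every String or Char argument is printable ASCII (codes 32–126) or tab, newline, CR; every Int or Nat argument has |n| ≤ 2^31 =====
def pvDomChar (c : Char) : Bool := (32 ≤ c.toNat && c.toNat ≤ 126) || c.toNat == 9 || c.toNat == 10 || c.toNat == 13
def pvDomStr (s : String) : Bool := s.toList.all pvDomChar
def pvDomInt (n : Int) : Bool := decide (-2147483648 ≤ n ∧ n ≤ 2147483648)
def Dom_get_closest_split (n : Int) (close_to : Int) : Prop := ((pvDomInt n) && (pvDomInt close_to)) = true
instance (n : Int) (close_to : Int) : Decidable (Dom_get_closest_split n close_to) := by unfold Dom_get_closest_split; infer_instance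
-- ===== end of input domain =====

-- B enumerates divisors in pairs (i, n//i) only up to sqrt(n) instead of scanning 1..n,
-- and selects the closest in one scan that carries the previous divisor; objective: faster (asymptotic, O(sqrt n) vs O(n)).

-- ===== PORT A =====
-- getDivisors: while i <= n, appending i when n % i == 0 (the range 1..n traversed in order)
def getDivisors (n : Int) : List Int :=
  (PySem.List.pyRange 1 (n + 1) 1).foldl
    (fun res i => if PySem.Int.mod n i = 0 then res ++ [i] else res) []

-- the 'for ix, val in enumerate(all_divisors)' loop; the unreachable 'none' branch
-- corresponds to an out-of-range all_divisors[ix-1], which Python never hits (ix ≥ 1 there)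
def aScan (all_divisors : List Int) (close_to : Int) : List (Int × Int) → Option Int
  | [] => none
  | (ix, val) :: rest =>
    if close_to < val then
      if ix = 0 then some val
      else
        match PySem.List.pyGet? all_divisors (ix - 1) with
        | some prev => if val - close_to > close_to - prev then some prev else some val
        | none => none
    else aScan all_divisors close_to rest

def get_closest_split (n : Int) (close_to : Int) : Option Int :=
  aScan (getDivisors n) close_to (PySem.List.enumerate (getDivisors n) 0)

-- ===== PORT B =====
-- while i*i <= n: collect i into small and n//i into large (the '1 ≤ i' guard only
-- serves termination; the loop is entered with i = 1 so it is always true)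
def bLoop (n : Int) (i : Int) (small large : List Int) : List Int × List Int :=
  if h : 1 ≤ i ∧ i * i ≤ n then
    let q := PySem.Int.floordiv n i
    if PySem.Int.mod n i = 0 then
      bLoop n (i + 1) (small ++ [i]) (if i ≠ q then large ++ [q] else large)
    else
      bLoop n (i + 1) small large
  else (small, large)
termination_by (n + 1 - i).toNat
decreasing_by
  all_goals
    have hi : i ≤ n := le_trans (by nlinarith [h.1, h.2] : i ≤ i * i) h.2
    omega

def bScan (close_to : Int) (prev : Option Int) : List Int → Option Int
  | [] => none
  | val :: rest =>
    if close_to < val then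
      match prev with
      | none => some val
      | some p => if val - close_to > close_to - p then some p else some val
    else bScan close_to (some val) rest

def get_closest_split_alt (n : Int) (close_to : Int) : Option Int :=
  bScan close_to none ((bLoop n 1 [] []).1 ++ (bLoop n 1 [] []).2.reverse)

-- ===== PRECONDITION & SPEC =====
def Spec_get_closest_split (n : Int) (close_to : Int) (out : Option Int) : Prop := out = get_closest_split_alt n close_to
instance (n : Int) (close_to : Int) (out : Option Int) : Decidable (Spec_get_closest_split n close_to out) := by unfold Spec_get_closest_split; infer_instance

-- ===== CLAIM (what is proved, stated in full; the proofs are below) =====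
def Claim_equal_get_closest_split : Prop := ∀ (n : Int) (close_to : Int), Dom_get_closest_split n close_to → Spec_get_closest_split n close_to (get_closest_split n close_to)

-- ===== LEMMAS AND PROOFS =====

-- sorted list of divisors of n lying in [i, n//i]
def rf (n i : Int) : List Int :=
  (PySem.List.pyRange i (PySem.Int.floordiv n i + 1) 1).filter
    (fun d => decide (PySem.Int.mod n d = 0))

lemma getDivisors_eq_filter (n : Int) :
    getDivisors n =
      (PySem.List.pyRange 1 (n + 1) 1).filter (fun d => decide (PySem.Int.mod n d = 0)) := by
  unfold getDivisors
  have := PySem.List.foldl_append_if (fun d => decide (PySem.Int.mod n d = 0)) (id)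
    (PySem.List.pyRange 1 (n + 1) 1) []
  simpa [List.map_id] using this

lemma getDivisors_eq_rf (n : Int) : getDivisors n = rf n 1 := by
  rw [getDivisors_eq_filter, rf]
  by_cases hn : 1 ≤ n
  · rw [PySem.Int.floordiv_eq_ediv_of_pos (by omega : (0:Int) < 1), Int.ediv_one]
  · rw [PySem.List.pyRange_one_eq_nil (by omega : n + 1 ≤ 1),
        PySem.List.pyRange_one_eq_nil]
    have : PySem.Int.floordiv n 1 = n := by
      rw [PySem.Int.floordiv_eq_ediv_of_pos (by omega : (0:Int) < 1), Int.ediv_one]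
    omega

-- every divisor of n strictly between n//(i+1) and n//i (inclusive) forces i ∣ n and equals n//i
lemma uniqueDiv {n i d : Int} (h1 : 1 ≤ i) (h2 : i * i ≤ n)
    (hd1 : PySem.Int.floordiv n (i + 1) < d) (hd2 : d ≤ PySem.Int.floordiv n i)
    (hdd : PySem.Int.mod n d = 0) :
    PySem.Int.mod n i = 0 ∧ d = PySem.Int.floordiv n i := by
  have hn : 1 ≤ n := le_trans (by nlinarith) h2
  have hd0 : 0 < d := by
    have h0 : (0:Int) ≤ PySem.Int.floordiv n (i + 1) :=
      (PySem.Int.le_floordiv_iff_mul_le (by omega)).2 (by omega)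
    omega
  have hnk0 : PySem.Int.floordiv n d * d + 0 = n := by
    rw [← hdd]; exact PySem.Int.floordiv_mul_add_mod n d
  obtain ⟨k, hnk⟩ : ∃ k, k * d = n := ⟨PySem.Int.floordiv n d, by omega⟩
  have hdi : d * i ≤ n := (PySem.Int.le_floordiv_iff_mul_le (by omega)).1 hd2
  have hik : i ≤ k := by nlinarith
  have hlt : n < d * (i + 1) := by
    have := (PySem.Int.floordiv_lt_iff_lt_mul (by omega : (0:Int) < i + 1)).1 hd1
    nlinarith
  have hki : k < i + 1 := by nlinarith
  have hke : k = i := by omega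
  have hni : n = i * d := by rw [← hnk, hke]
  refine ⟨(PySem.Int.mod_eq_zero_iff_dvd n i).2 ⟨d, hni⟩, ?_⟩
  have : PySem.Int.floordiv n i = d :=
    (PySem.Int.floordiv_eq_iff_of_pos (by omega)).2 ⟨by nlinarith, by nlinarith⟩
  omega

-- filter over a range whose only possible hit is the right endpoint
lemma filter_range_unique (p : Int → Bool) (a b : Int)
    (h : ∀ d, a ≤ d → d ≤ b → p d = true → d = b) :
    (PySem.List.pyRange a (b + 1) 1).filter p =
      if a ≤ b ∧ p b = true then [b] else [] := by
  by_cases hab : a ≤ b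
  · rw [PySem.List.pyRange_one_cons (by omega : a < b + 1)]
    by_cases heq : a = b
    · subst heq
      rw [PySem.List.pyRange_one_eq_nil (by omega)]
      by_cases hp : p a = true <;> simp [hp]
    · have hpa : p a = false := by
        by_cases hp : p a = true
        · exact absurd (h a le_rfl hab hp) heq
        · simpa using hp
      have ih := filter_range_unique p (a + 1) b
        (fun d hd1 hd2 hp => h d (by omega) hd2 hp)
      simp only [List.filter_cons, hpa]
      rw [ih]
      have hif : (a + 1 ≤ b ∧ p b = true) ↔ (a ≤ b ∧ p b = true) := by
        constructor <;> rintro ⟨h1, h2⟩ <;> exact ⟨by omega, h2⟩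
      simp only [Bool.false_eq_true, if_false]
      exact if_congr hif rfl rfl
  · rw [PySem.List.pyRange_one_eq_nil (by omega)]
    simp [hab]
termination_by (b + 1 - a).toNat
decreasing_by omega

lemma rf_exit {n i : Int} (h1 : 1 ≤ i) (h2 : n < i * i) : rf n i = [] := by
  unfold rf
  rw [PySem.List.pyRange_one_eq_nil, List.filter_nil]
  have : PySem.Int.floordiv n i < i := (PySem.Int.floordiv_lt_iff_lt_mul (by omega)).2 (by nlinarith)
  omega

lemma rf_step {n i : Int} (h1 : 1 ≤ i) (h2 : i * i ≤ n) :
    rf n i =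
      (if PySem.Int.mod n i = 0 then [i] else []) ++ rf n (i + 1) ++
      (if PySem.Int.mod n i = 0 ∧ i ≠ PySem.Int.floordiv n i
        then [PySem.Int.floordiv n i] else []) := by
  have hn : 1 ≤ n := le_trans (by nlinarith) h2
  set m := PySem.Int.floordiv n i with hm
  set m' := PySem.Int.floordiv n (i + 1) with hm'
  have him : i ≤ m := by
    rw [hm]; exact (PySem.Int.le_floordiv_iff_mul_le (by omega)).2 (by nlinarith)
  have hm'0 : 0 ≤ m' := by
    rw [hm']; exact (PySem.Int.le_floordiv_iff_mul_le (by omega)).2 (by omega)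
  have hm'up : m' * (i + 1) ≤ n := by
    rw [hm']; exact (PySem.Int.le_floordiv_iff_mul_le (by omega)).1 le_rfl
  have hm'm : m' ≤ m := by
    rw [hm]; exact (PySem.Int.le_floordiv_iff_mul_le (by omega)).2 (by nlinarith)
  have hmod_m : PySem.Int.mod n i = 0 → PySem.Int.mod n m = 0 := by
    intro hdvd
    have hnm : m * i + 0 = n := by rw [← hdvd, hm]; exact PySem.Int.floordiv_mul_add_mod n i
    exact (PySem.Int.mod_eq_zero_iff_dvd n m).2 ⟨i, by omega⟩
  unfold rf
  rw [← hm, ← hm', PySem.List.pyRange_one_cons (by omega : i < m + 1), List.filter_cons]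
  by_cases hcase : i + 1 ≤ m' + 1
  · -- split the tail range at m' + 1
    have hm'lt : PySem.Int.mod n i = 0 → m' < m := by
      intro hdvd
      have hnm : m * i + 0 = n := by rw [← hdvd, hm]; exact PySem.Int.floordiv_mul_add_mod n i
      by_contra hc
      have he : m' = m := by omega
      nlinarith [he ▸ hm'up]
    have hne : PySem.Int.mod n i = 0 → i ≠ m := by
      intro hdvd heq
      have hnm : m * i + 0 = n := by rw [← hdvd, hm]; exact PySem.Int.floordiv_mul_add_mod n i
      have him' : i ≤ m' := by omega
      nlinarith
    rw [PySem.List.pyRange_one_append (i + 1) (m' + 1) (m + 1) (by omega) (by omega),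
        List.filter_append,
        filter_range_unique _ (m' + 1) m
          (fun d hd1 hd2 hp => by
            have hu := uniqueDiv h1 h2 (show PySem.Int.floordiv n (i + 1) < d by omega)
              (show d ≤ PySem.Int.floordiv n i by omega) (by simpa using hp)
            omega)]
    have hiff : (m' + 1 ≤ m ∧ decide (PySem.Int.mod n m = 0) = true) ↔
        (PySem.Int.mod n i = 0 ∧ i ≠ m) := by
      constructor
      · rintro ⟨hle, hp⟩
        have hu := uniqueDiv h1 h2 (show PySem.Int.floordiv n (i + 1) < m by omega)
          (show m ≤ PySem.Int.floordiv n i by omega) (by simpa using hp)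
        exact ⟨hu.1, hne hu.1⟩
      · rintro ⟨hdvd, hni⟩
        exact ⟨by have := hm'lt hdvd; omega, by simpa using hmod_m hdvd⟩
    have hcond : (if m' + 1 ≤ m ∧ decide (PySem.Int.mod n m = 0) = true then [m] else []) =
        (if PySem.Int.mod n i = 0 ∧ i ≠ m then [m] else []) := by
      by_cases hx : PySem.Int.mod n i = 0 ∧ i ≠ m
      · rw [if_pos (hiff.2 hx), if_pos hx]
      · rw [if_neg (fun hc => hx (hiff.1 hc)), if_neg hx]
    rw [hcond]
    by_cases hdvd : PySem.Int.mod n i = 0 <;> simp [hdvd]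
  · -- m' < i + 1 : the remaining subrange is empty
    rw [show PySem.List.pyRange (i + 1) (m' + 1) = [] from
          PySem.List.pyRange_one_eq_nil (by omega), List.filter_nil,
        filter_range_unique _ (i + 1) m
          (fun d hd1 hd2 hp => by
            have hu := uniqueDiv h1 h2 (show PySem.Int.floordiv n (i + 1) < d by omega)
              (show d ≤ PySem.Int.floordiv n i by omega) (by simpa using hp)
            omega)]
    have hiff : (i + 1 ≤ m ∧ decide (PySem.Int.mod n m = 0) = true) ↔
        (PySem.Int.mod n i = 0 ∧ i ≠ m) := by
      constructor
      · rintro ⟨hle, hp⟩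
        have hu := uniqueDiv h1 h2 (show PySem.Int.floordiv n (i + 1) < m by omega)
          (show m ≤ PySem.Int.floordiv n i by omega) (by simpa using hp)
        exact ⟨hu.1, by omega⟩
      · rintro ⟨hdvd, hni⟩
        exact ⟨by omega, by simpa using hmod_m hdvd⟩
    have hcond : (if i + 1 ≤ m ∧ decide (PySem.Int.mod n m = 0) = true then [m] else []) =
        (if PySem.Int.mod n i = 0 ∧ i ≠ m then [m] else []) := by
      by_cases hx : PySem.Int.mod n i = 0 ∧ i ≠ m
      · rw [if_pos (hiff.2 hx), if_pos hx]
      · rw [if_neg (fun hc => hx (hiff.1 hc)), if_neg hx]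
    rw [hcond]
    by_cases hdvd : PySem.Int.mod n i = 0 <;> simp [hdvd]

lemma bLoop_inv (n : Int) : ∀ (fuel : Nat) (i : Int) (small large : List Int),
    1 ≤ i → (n + 1 - i).toNat ≤ fuel →
    (bLoop n i small large).1 ++ (bLoop n i small large).2.reverse =
      small ++ rf n i ++ large.reverse := by
  intro fuel
  induction fuel with
  | zero =>
    intro i small large h1 hf
    have hni : n < i := by omega
    rw [bLoop]
    have : ¬ (1 ≤ i ∧ i * i ≤ n) := by
      rintro ⟨ha, hb⟩; nlinarith
    rw [dif_neg this, rf_exit h1 (by nlinarith)]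
    simp
  | succ f ih =>
    intro i small large h1 hf
    rw [bLoop]
    by_cases hc : 1 ≤ i ∧ i * i ≤ n
    · have hin : i ≤ n := le_trans (by nlinarith [hc.1, hc.2]) hc.2
      rw [dif_pos hc, rf_step hc.1 hc.2]
      by_cases hdvd : PySem.Int.mod n i = 0
      · rw [if_pos hdvd]
        rw [ih (i + 1) _ _ (by omega) (by omega)]
        by_cases hq : i ≠ PySem.Int.floordiv n i
        · simp [hdvd, hq, List.append_assoc]
        · simp [hdvd, hq, List.append_assoc]
      · rw [if_neg hdvd, ih (i + 1) _ _ (by omega) (by omega)]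
        simp [hdvd, List.append_assoc]
    · rw [dif_neg hc]
      have h2 : n < i * i := by
        by_contra hcc; exact hc ⟨h1, by omega⟩
      rw [rf_exit h1 h2]
      simp

lemma divisors_agree (n : Int) :
    (bLoop n 1 [] []).1 ++ (bLoop n 1 [] []).2.reverse = getDivisors n := by
  rw [getDivisors_eq_rf]
  have := bLoop_inv n (n + 1 - 1).toNat 1 [] [] le_rfl le_rfl
  simpa using this

lemma scan_eq (divs : List Int) (c : Int) :
    ∀ (suf : List Int) (k : Nat), divs.drop k = suf →
    aScan divs c (PySem.List.enumerate suf (k : Int)) =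
      bScan c (if k = 0 then none else divs[k - 1]?) suf := by
  intro suf
  induction suf with
  | nil => intro k hk; simp [PySem.List.enumerate_nil, aScan, bScan]
  | cons val rest ih =>
    intro k hk
    have hget : divs[k]? = some val := by
      have : (divs.drop k)[0]? = some val := by rw [hk]; rfl
      simpa [List.getElem?_drop] using this
    have hklen : k < divs.length := by
      by_contra hc
      rw [List.getElem?_eq_none (by omega)] at hget
      simp at hget
    rw [PySem.List.enumerate_cons]
    show aScan divs c (((k : Int), val) :: PySem.List.enumerate rest ((k : Int) + 1)) = _
    simp only [aScan, bScan]
    by_cases hcv : c < val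
    · rw [if_pos hcv, if_pos hcv]
      by_cases hk0 : k = 0
      · subst hk0
        simp
      · have hkk : ((k : Int)) ≠ 0 := by exact_mod_cast hk0
        rw [if_neg hkk, if_neg hk0]
        have hcast : (k : Int) - 1 = ((k - 1 : Nat) : Int) := by omega
        rw [hcast, PySem.List.pyGet?_natCast]
        have hprev : divs[k - 1]? = some (divs[k - 1]'(by omega)) :=
          List.getElem?_eq_getElem (by omega)
        rw [hprev]
    · rw [if_neg hcv, if_neg hcv]
      have hdrop : divs.drop (k + 1) = rest := by
        rw [← List.tail_drop, hk, List.tail_cons]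
      have := ih (k + 1) hdrop
      rw [show ((k : Int) + 1) = ((k + 1 : Nat) : Int) by push_cast; ring, this]
      simp [hget]

-- ===== VERDICT (by name: the statement is the Claim_ definition above) =====
theorem get_closest_split_spec : Claim_equal_get_closest_split := by
  intro n close_to _
  show get_closest_split n close_to = get_closest_split_alt n close_to
  unfold get_closest_split get_closest_split_alt
  rw [divisors_agree n]
  have := scan_eq (getDivisors n) close_to (getDivisors n) 0 rfl
  simpa using this
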